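-- pv_equiv track=rewrite | github.com/scottmccarrison/nexus-collection-dl | nexus_collection_dl/service.py | _select_mod_file
-- ===== SOURCE A (Python) =====
-- def _select_mod_file(
--     files: list[dict], file_id_override: int | None = None
-- ) -> dict | None:
--     """Select a file from the mod's file list.
--
--     Priority:
--     1. file_id override (exact match)
--     2. MAIN category, highest file_id (most recent)
--     3. Any non-archived file, highest file_id
--     4. None
--     """
--     if not files:
--         return None
--
--     if file_id_override is not None:
--         for f in files:
--             if f.get("file_id") == file_id_override:
--                 return f
--         return None
--
--     main_files = [f for f in files if f.get("category_id") == 1]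
--     if main_files:
--         return max(main_files, key=lambda f: f.get("file_id", 0))
--
--     non_archived = [f for f in files if f.get("category_id") != 6]
--     if non_archived:
--         return max(non_archived, key=lambda f: f.get("file_id", 0))
--
--     return None
-- ===== SOURCE B (Python) =====
-- def _select_mod_file(
--     files: list[dict], file_id_override: int | None = None
-- ) -> dict | None:
--     """One fused pass instead of two filter+max passes."""
--     if not files:
--         return None
--
--     if file_id_override is not None:
--         return next((f for f in files if f.get("file_id") == file_id_override), None)
--
--     best_main = None
--     best_other = None
--     for f in files:
--         cat = f.get("category_id")
--         if cat == 1 and (best_main is None or f.get("file_id", 0) > best_main.get("file_id", 0)):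
--             best_main = f
--         if cat != 6 and (best_other is None or f.get("file_id", 0) > best_other.get("file_id", 0)):
--             best_other = f
--     return best_main if best_main is not None else best_other
-- ===== Notes on version B (the rewrite author's own statement) =====
-- stated objective: alternative
-- what changed: Replaces A's two filter-then-max passes (build main_files, max it; else build non_archived, max it) by a single fused loop over files maintaining two running candidates best_main/best_other with strict > (keeping the first maximal, like Python's max), then returns best_main, else best_other, else None; the override lookup becomes a next() over a generator.
import Mathlib
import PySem

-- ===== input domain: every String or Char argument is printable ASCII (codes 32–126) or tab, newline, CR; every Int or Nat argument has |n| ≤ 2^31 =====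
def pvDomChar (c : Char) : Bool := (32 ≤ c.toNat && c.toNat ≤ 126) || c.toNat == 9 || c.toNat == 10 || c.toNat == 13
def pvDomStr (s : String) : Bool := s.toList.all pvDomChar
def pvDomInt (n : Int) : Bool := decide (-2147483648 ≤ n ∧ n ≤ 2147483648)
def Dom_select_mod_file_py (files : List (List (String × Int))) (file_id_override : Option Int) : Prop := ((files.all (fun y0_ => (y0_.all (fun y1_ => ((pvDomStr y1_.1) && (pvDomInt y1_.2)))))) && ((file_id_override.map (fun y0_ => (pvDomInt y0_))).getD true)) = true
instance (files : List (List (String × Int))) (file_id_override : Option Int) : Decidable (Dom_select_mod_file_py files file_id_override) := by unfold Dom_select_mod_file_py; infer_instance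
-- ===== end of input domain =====

-- B replaces A's two filter-then-max passes by ONE fused loop maintaining two running candidates (objective: alternative decomposition, same cost).

-- ===== PORT A =====
-- f.get(k) on the dict (association list, first match)
def aGet (f : List (String × Int)) (k : String) : Option Int :=
  PySem.Dict.get? (PySem.Dict.mk f) k

-- f.get("file_id", 0)
def aFid (f : List (String × Int)) : Int :=
  (aGet f "file_id").getD 0

-- the 'for f in files: if f.get("file_id") == file_id_override: return f' loop
def aOverrideLoop : List (List (String × Int)) → Int → Option (List (String × Int))
  | [], _ => none
  | f :: rest, v =>
      if aGet f "file_id" = some v then some f else aOverrideLoop rest v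

def select_mod_file_py (files : List (List (String × Int))) (file_id_override : Option Int) : Option (List (String × Int)) :=
  if files = [] then none
  else
    match file_id_override with
    | some v => aOverrideLoop files v
    | none =>
      let main_files := files.filter (fun f => aGet f "category_id" = some 1)
      if main_files ≠ [] then
        PySem.List.max? main_files aFid
      else
        let non_archived := files.filter (fun f => aGet f "category_id" ≠ some 6)
        if non_archived ≠ [] then
          PySem.List.max? non_archived aFid
        else none

-- ===== PORT B =====
-- 'best if it beats the incumbent' update (strict >, first maximal kept)
def bUpd (best : Option (List (String × Int))) (f : List (String × Int)) : Option (List (String × Int)) :=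
  match best with
  | none => some f
  | some g => if aFid g < aFid f then some f else some g

-- the single fused loop over files, carrying (best_main, best_other)
def bStep (acc : Option (List (String × Int)) × Option (List (String × Int)))
    (f : List (String × Int)) :
    Option (List (String × Int)) × Option (List (String × Int)) :=
  let cat := aGet f "category_id"
  ((if cat = some 1 then bUpd acc.1 f else acc.1),
   (if cat ≠ some 6 then bUpd acc.2 f else acc.2))

def select_mod_file_py_alt (files : List (List (String × Int))) (file_id_override : Option Int) : Option (List (String × Int)) :=
  if files = [] then none
  else
    match file_id_override with
    | some v => files.find? (fun f => aGet f "file_id" == some v)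
    | none =>
      let bests := files.foldl bStep (none, none)
      match bests.1 with
      | some m => some m
      | none => bests.2

-- ===== PRECONDITION & SPEC =====
def Spec_select_mod_file_py (files : List (List (String × Int))) (file_id_override : Option Int) (out : Option (List (String × Int))) : Prop := out = select_mod_file_py_alt files file_id_override
instance (files : List (List (String × Int))) (file_id_override : Option Int) (out : Option (List (String × Int))) : Decidable (Spec_select_mod_file_py files file_id_override out) := by unfold Spec_select_mod_file_py; infer_instance

-- ===== CLAIM (what is proved, stated in full; the proofs are below) =====
def Claim_equal_select_mod_file_py : Prop := ∀ (files : List (List (String × Int))) (file_id_override : Option Int), Dom_select_mod_file_py files file_id_override → Spec_select_mod_file_py files file_id_override (select_mod_file_py files file_id_override)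

-- ===== LEMMAS AND PROOFS =====

-- A's override loop is find?
theorem aOverrideLoop_eq_find? (files : List (List (String × Int))) (v : Int) :
    aOverrideLoop files v = files.find? (fun f => aGet f "file_id" == some v) := by
  induction files with
  | nil => rfl
  | cons f rest ih =>
    simp only [aOverrideLoop, List.find?_cons]
    by_cases h : aGet f "file_id" = some v
    · rw [if_pos h, show (aGet f "file_id" == some v) = true from beq_iff_eq.mpr h]
    · rw [if_neg h, show (aGet f "file_id" == some v) = false from beq_eq_false_iff_ne.mpr h, ih]

-- the paired fold splits into two independent folds
theorem foldl_bStep_split (files : List (List (String × Int)))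
    (bm bo : Option (List (String × Int))) :
    files.foldl bStep (bm, bo) =
      (files.foldl (fun b f => if aGet f "category_id" = some 1 then bUpd b f else b) bm,
       files.foldl (fun b f => if aGet f "category_id" ≠ some 6 then bUpd b f else b) bo) := by
  induction files generalizing bm bo with
  | nil => rfl
  | cons f rest ih =>
    simp only [List.foldl_cons, bStep]
    exact ih _ _

-- a guarded fold over the whole list is the plain fold over the filtered list
theorem foldl_guard_eq_filter (p : List (String × Int) → Prop) [DecidablePred p]
    (files : List (List (String × Int))) (b : Option (List (String × Int))) :
    files.foldl (fun b f => if p f then bUpd b f else b) b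
      = (files.filter (fun f => decide (p f))).foldl bUpd b := by
  induction files generalizing b with
  | nil => rfl
  | cons f rest ih =>
    simp only [List.foldl_cons, List.filter_cons]
    by_cases h : p f
    · simp [h, ih]
    · simp [h, ih]

-- fold of bUpd from none is PySem.List.max? with key aFid
theorem foldl_bUpd_eq_max? (l : List (List (String × Int))) :
    l.foldl bUpd none = PySem.List.max? l aFid := by
  simp only [PySem.List.max?]
  congr 1
  funext b f
  cases b <;> rfl

-- A's 'if nonempty then max else fall through' chain equals B's 'first candidate wins' match
theorem ifMax (l1 l2 : List (List (String × Int))) :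
    (if l1 ≠ [] then PySem.List.max? l1 aFid
     else if l2 ≠ [] then PySem.List.max? l2 aFid else none)
    = (match PySem.List.max? l1 aFid with
       | some m => some m
       | none => PySem.List.max? l2 aFid) := by
  by_cases h1 : l1 = []
  · subst h1
    have e1 : PySem.List.max? ([] : List (List (String × Int))) aFid = none := rfl
    rw [e1]
    simp only [ne_eq, not_true_eq_false, if_false]
    by_cases h2 : l2 = []
    · subst h2; simp [e1]
    · simp [h2]
  · obtain ⟨m, hm⟩ := Option.ne_none_iff_exists'.mp
      (by rw [Ne, PySem.List.max?_eq_none_iff]; exact h1 :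
        PySem.List.max? l1 aFid ≠ none)
    simp [h1, hm]

-- ===== VERDICT (by name: the statement is the Claim_ definition above) =====
theorem select_mod_file_py_spec : Claim_equal_select_mod_file_py := by
  intro files fo _
  unfold Spec_select_mod_file_py select_mod_file_py select_mod_file_py_alt
  by_cases hnil : files = []
  · simp [hnil]
  · simp only [hnil, if_neg, ite_false]
    match fo with
    | some v => exact aOverrideLoop_eq_find? files v
    | none =>
      simp only
      rw [foldl_bStep_split]
      rw [foldl_guard_eq_filter (fun f => aGet f "category_id" = some 1),
          foldl_guard_eq_filter (fun f => aGet f "category_id" ≠ some 6)]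
      rw [foldl_bUpd_eq_max?, foldl_bUpd_eq_max?]
      exact ifMax _ _
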